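-- pv_equiv track=rewrite | github.com/lucs100/kick-start-code | 2021/round d/test.py | performCut
-- ===== SOURCE A (Python) =====
-- def performCut(intervalList, b):
--     for interval in intervalList:
--         if (interval[0] < b < interval[1]):
--             intervalList = list(intervalList)
--             intervalList.append([interval[0], b])
--             intervalList.append([b, interval[1]])
--             intervalList.remove(interval)
--     return intervalList
-- ===== SOURCE B (Python) =====
-- def performCut(intervalList, b):
--     kept = [iv for iv in intervalList if not (iv[0] < b < iv[1])]
--     halves = [h for iv in intervalList if iv[0] < b < iv[1]
--                 for h in ([iv[0], b], [b, iv[1]])]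
--     return kept + halves
-- ===== Notes on version B (the rewrite author's own statement) =====
-- stated objective: simpler
-- what changed: Two declarative comprehension passes (filter of non-matching intervals, then the flattened halves of matching ones, concatenated) replace A's mutate-while-iterating loop that copies the list and linearly remove()s each matched interval.
-- outside the precondition, e.g. on performCut([[]], 3): A raises IndexError, B raises IndexError; on performCut([[0]], 3): A raises IndexError, B raises IndexError
import Mathlib
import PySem

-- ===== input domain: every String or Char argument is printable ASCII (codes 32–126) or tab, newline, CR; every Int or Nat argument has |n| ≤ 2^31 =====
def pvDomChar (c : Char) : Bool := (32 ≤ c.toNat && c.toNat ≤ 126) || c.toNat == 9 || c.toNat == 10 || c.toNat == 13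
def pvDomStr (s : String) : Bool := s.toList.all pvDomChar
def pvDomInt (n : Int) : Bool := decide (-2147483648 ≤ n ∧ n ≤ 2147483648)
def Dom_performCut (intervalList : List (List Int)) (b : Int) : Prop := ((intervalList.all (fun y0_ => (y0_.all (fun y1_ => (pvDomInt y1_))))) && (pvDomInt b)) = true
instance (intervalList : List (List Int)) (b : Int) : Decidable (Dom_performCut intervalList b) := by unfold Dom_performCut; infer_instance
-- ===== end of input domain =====

-- B replaces A's mutate-while-iterating loop (per-match list copy and linear remove())
-- by two declarative comprehension passes concatenated. Equivalence is about the return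
-- value; neither program mutates its argument observably (A rebinds a copy before mutating).

-- ===== PORT A =====
-- the Python 'for' iterates over the ORIGINAL list while 'intervalList' is rebound to
-- copies; state cur = the current (rebound) list; remove() = first-occurrence removal
-- (PySem.List.remove?); indexing via pyGetD (the default is never reached inside Pre_)
def performCutGo (b : Int) (orig cur : List (List Int)) : List (List Int) :=
  match orig with
  | [] => cur
  | interval :: rest =>
    if decide (PySem.List.pyGetD interval 0 0 < b ∧ b < PySem.List.pyGetD interval 1 0) then
      let grown := cur ++ [[PySem.List.pyGetD interval 0 0, b], [b, PySem.List.pyGetD interval 1 0]]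
      performCutGo b rest ((PySem.List.remove? grown interval).getD grown)
    else
      performCutGo b rest cur

def performCut (intervalList : List (List Int)) (b : Int) : List (List Int) :=
  performCutGo b intervalList intervalList

-- ===== PORT B =====
-- iv[0] < b < iv[1], through Python indexing
def pvCut (b : Int) (iv : List Int) : Bool :=
  decide (PySem.List.pyGetD iv 0 0 < b ∧ b < PySem.List.pyGetD iv 1 0)

-- the two halves [iv[0], b], [b, iv[1]] of a matched interval
def pvSplit (b : Int) (iv : List Int) : List (List Int) :=
  [[PySem.List.pyGetD iv 0 0, b], [b, PySem.List.pyGetD iv 1 0]]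

def performCut_alt (intervalList : List (List Int)) (b : Int) : List (List Int) :=
  intervalList.filter (fun iv => !pvCut b iv)
    ++ (intervalList.filter (pvCut b)).flatMap (pvSplit b)

-- ===== PRECONDITION & SPEC =====
-- Pre_ excludes exactly the inputs where Python A raises IndexError: an interval with
-- fewer than 2 elements whose second indexing is reached ([], or [x] with x < b). B raises there too.
def Pre_performCut (intervalList : List (List Int)) (b : Int) : Prop :=
  ∀ iv ∈ intervalList, 2 ≤ iv.length ∨ (iv.length = 1 ∧ ¬ (iv.headD 0 < b))
instance (intervalList : List (List Int)) (b : Int) : Decidable (Pre_performCut intervalList b) := by unfold Pre_performCut; infer_instance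

def pvWitness_performCut : List (List Int) × Int := ([[0, 5], [1, 2], [7, 9]], 3)

def Spec_performCut (intervalList : List (List Int)) (b : Int) (out : List (List Int)) : Prop := out = performCut_alt intervalList b
instance (intervalList : List (List Int)) (b : Int) (out : List (List Int)) : Decidable (Spec_performCut intervalList b out) := by unfold Spec_performCut; infer_instance

-- ===== CLAIM (what is proved, stated in full; the proofs are below) =====
def Claim_equal_performCut : Prop := ∀ (intervalList : List (List Int)) (b : Int), Dom_performCut intervalList b → Pre_performCut intervalList b → Spec_performCut intervalList b (performCut intervalList b)

-- ===== LEMMAS AND PROOFS =====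

-- the two halves never match the split condition themselves
theorem pvCut_split (b : Int) (iv h : List Int) (hh : h ∈ pvSplit b iv) :
    pvCut b h = false := by
  simp [pvSplit] at hh
  rcases hh with h1 | h2 <;> subst_vars <;>
    simp [pvCut, PySem.List.pyGetD, PySem.List.pyGet?, PySem.List.pyIdx?]

-- erasing a matching element does not change the non-matching filter
theorem filter_erase_match (b : Int) (iv : List Int) (hm : pvCut b iv = true) :
    ∀ l : List (List Int), (l.erase iv).filter (fun x => !pvCut b x) = l.filter (fun x => !pvCut b x) := by
  intro l
  induction l with
  | nil => rfl
  | cons x xs ih =>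
    by_cases hx : x = iv
    · subst hx
      simp [List.erase_cons_head, hm]
    · rw [List.erase_cons_tail (by simpa using hx)]
      simp only [List.filter_cons, ih]

-- A's loop invariant: if every matching value occurs in cur as often as in the remaining
-- original suffix, the loop returns cur's non-matching part followed by the suffix's halves
theorem key (b : Int) : ∀ (orig cur : List (List Int)),
    (∀ v, pvCut b v = true → cur.count v = orig.count v) →
    performCutGo b orig cur =
      cur.filter (fun x => !pvCut b x) ++ (orig.filter (pvCut b)).flatMap (pvSplit b) := by
  intro orig
  induction orig with
  | nil =>
    intro cur hc
    have : ∀ x ∈ cur, (!pvCut b x) = true := by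
      intro x hx
      by_contra h
      have hm : pvCut b x = true := by revert h; cases pvCut b x <;> simp
      have h0 := hc x hm
      simp only [List.count_nil] at h0
      exact absurd hx (List.count_eq_zero.mp h0)
    simp [performCutGo, List.filter_eq_self.mpr this]
  | cons iv rest ih =>
    intro cur hc
    by_cases hm : pvCut b iv
    · have hcnt : cur.count iv = (iv :: rest).count iv := hc iv hm
      have hivcur : iv ∈ cur := by
        have : 0 < cur.count iv := by rw [hcnt, List.count_cons_self]; omega
        exact List.count_pos_iff.mp this
      have hrem : PySem.List.remove? (cur ++ pvSplit b iv) iv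
          = some ((cur ++ pvSplit b iv).erase iv) := by
        exact PySem.List.remove?_eq_some_erase _ iv (by simp [hivcur])
      have herase : (cur ++ pvSplit b iv).erase iv = cur.erase iv ++ pvSplit b iv :=
        List.erase_append_left _ hivcur
      have hstep : performCutGo b (iv :: rest) cur
          = performCutGo b rest (cur.erase iv ++ pvSplit b iv) := by
        rw [performCutGo.eq_def]
        simp only [show (decide (PySem.List.pyGetD iv 0 0 < b ∧ b < PySem.List.pyGetD iv 1 0)) = true from hm,
          if_true, show (cur ++ [[PySem.List.pyGetD iv 0 0, b], [b, PySem.List.pyGetD iv 1 0]]) = cur ++ pvSplit b iv from rfl,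
          hrem, Option.getD_some, herase]
      rw [hstep, ih]
      · rw [List.filter_append]
        have hhf : (pvSplit b iv).filter (fun x => !pvCut b x) = pvSplit b iv :=
          List.filter_eq_self.mpr (fun x hx => by simp [pvCut_split b iv x hx])
        rw [hhf, filter_erase_match b iv hm]
        simp [hm, List.append_assoc]
      · intro v hv
        rw [List.count_append]
        have hhv : (pvSplit b iv).count v = 0 := by
          rw [List.count_eq_zero]
          intro hmem
          have := pvCut_split b iv v hmem
          rw [hv] at this; cases this
        by_cases hvi : v = iv
        · subst hvi
          rw [List.count_erase_self, hcnt, hhv, List.count_cons_self]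
          omega
        · rw [List.count_erase_of_ne hvi, hhv, hc v hv]
          simp [Ne.symm hvi]
    · simp only [Bool.not_eq_true] at hm
      have : performCutGo b (iv :: rest) cur = performCutGo b rest cur := by
        rw [performCutGo.eq_def]
        simp only [show (decide (PySem.List.pyGetD iv 0 0 < b ∧ b < PySem.List.pyGetD iv 1 0)) = false from hm]
        simp
      rw [this, ih]
      · simp [hm]
      · intro v hv
        have hne : v ≠ iv := fun h => by rw [← h, hv] at hm; cases hm
        rw [hc v hv]
        simp [Ne.symm hne]

-- ===== VERDICT (by name: the statement is the Claim_ definition above) =====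
theorem performCut_spec : Claim_equal_performCut := by
  intro l b _ _
  unfold Spec_performCut performCut performCut_alt
  rw [key b l l (fun v _ => rfl)]
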